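-- pv_equiv track=rewrite | github.com/fescofesco/CCC | Challenge 2025/Felix/level5/comprehensive_validator.py | check_collision_radius_1
-- ===== SOURCE A (Python) =====
-- def check_collision_radius_1(path, asteroid_x, asteroid_y):
--     """
--     Check collision with radius 1 around asteroid (3x3 grid).
--     Asteroid at center, spaceship cannot enter any of the 8 surrounding squares.
--     DEPRECATED - use radius 2 check instead.
--     """
--     forbidden_positions = set()
--     for dx in range(-1, 2):  # -1, 0, 1
--         for dy in range(-1, 2):  # -1, 0, 1
--             forbidden_positions.add((asteroid_x + dx, asteroid_y + dy))
--
--     collisions = []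
--     for i, (x, y) in enumerate(path):
--         if (x, y) in forbidden_positions:
--             collisions.append((i, x, y))
--
--     return collisions
-- ===== SOURCE B (Python) =====
-- def check_collision_radius_1(path, asteroid_x, asteroid_y):
--     # Simpler: test the Chebyshev distance <= 1 directly, no forbidden-set construction.
--     return [(i, x, y)
--             for i, (x, y) in enumerate(path)
--             if abs(x - asteroid_x) <= 1 and abs(y - asteroid_y) <= 1]
-- ===== Notes on version B (the rewrite author's own statement) =====
-- stated objective: simpler
-- what changed: Drops the precomputed 9-element forbidden set and its double range loop; a single comprehension tests the Chebyshev bound |x-ax|<=1 and |y-ay|<=1 arithmetically.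
import Mathlib
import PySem

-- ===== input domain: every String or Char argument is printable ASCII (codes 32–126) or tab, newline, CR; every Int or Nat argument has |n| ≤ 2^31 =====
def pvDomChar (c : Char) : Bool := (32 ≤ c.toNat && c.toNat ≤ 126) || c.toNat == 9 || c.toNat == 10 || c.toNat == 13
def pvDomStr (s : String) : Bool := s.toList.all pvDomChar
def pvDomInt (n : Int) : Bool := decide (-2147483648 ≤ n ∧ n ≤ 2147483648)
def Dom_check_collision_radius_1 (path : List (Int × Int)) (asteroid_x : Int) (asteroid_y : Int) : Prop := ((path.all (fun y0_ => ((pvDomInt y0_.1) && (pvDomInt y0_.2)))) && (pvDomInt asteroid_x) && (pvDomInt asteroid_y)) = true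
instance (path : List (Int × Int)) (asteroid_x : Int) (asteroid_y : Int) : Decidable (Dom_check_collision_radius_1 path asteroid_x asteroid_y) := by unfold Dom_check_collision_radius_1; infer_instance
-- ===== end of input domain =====

-- B replaces A's precomputed 3x3 forbidden set with a direct Chebyshev-distance test in one comprehension (simpler).


-- ===== PORT A =====
def check_collision_radius_1 (path : List (Int × Int)) (asteroid_x : Int) (asteroid_y : Int) : List (Int × Int × Int) :=
  let forbidden_positions : PySem.Set (Int × Int) :=
    (PySem.List.pyRange (-1) 2 1).foldl (fun s dx =>
      (PySem.List.pyRange (-1) 2 1).foldl (fun s dy =>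
        PySem.Set.add s (asteroid_x + dx, asteroid_y + dy)) s) PySem.Set.empty
  let collisions : List (Int × Int × Int) :=
    (PySem.List.enumerate path).foldl (fun acc p =>
      if PySem.Set.contains forbidden_positions p.2 then acc ++ [(p.1, p.2.1, p.2.2)] else acc) []
  collisions

-- ===== PORT B =====
def check_collision_radius_1_alt (path : List (Int × Int)) (asteroid_x : Int) (asteroid_y : Int) : List (Int × Int × Int) :=
  (PySem.List.enumerate path).filterMap (fun p =>
    if (p.2.1 - asteroid_x).natAbs ≤ 1 ∧ (p.2.2 - asteroid_y).natAbs ≤ 1 then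
      some (p.1, p.2.1, p.2.2)
    else none)

-- ===== PRECONDITION & SPEC =====
def Spec_check_collision_radius_1 (path : List (Int × Int)) (asteroid_x : Int) (asteroid_y : Int) (out : List (Int × Int × Int)) : Prop := out = check_collision_radius_1_alt path asteroid_x asteroid_y
instance (path : List (Int × Int)) (asteroid_x : Int) (asteroid_y : Int) (out : List (Int × Int × Int)) : Decidable (Spec_check_collision_radius_1 path asteroid_x asteroid_y out) := by unfold Spec_check_collision_radius_1; infer_instance

-- ===== CLAIM (what is proved, stated in full; the proofs are below) =====
def Claim_equal_check_collision_radius_1 : Prop := ∀ (path : List (Int × Int)) (asteroid_x : Int) (asteroid_y : Int), Dom_check_collision_radius_1 path asteroid_x asteroid_y → Spec_check_collision_radius_1 path asteroid_x asteroid_y (check_collision_radius_1 path asteroid_x asteroid_y)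

-- ===== LEMMAS AND PROOFS =====

-- The 3x3 forbidden set membership is exactly the Chebyshev bound.
theorem pv_mem_forbidden (ax ay x y : Int) :
    PySem.Set.contains
      ((PySem.List.pyRange (-1) 2 1).foldl (fun s dx =>
        (PySem.List.pyRange (-1) 2 1).foldl (fun s dy =>
          PySem.Set.add s (ax + dx, ay + dy)) s) PySem.Set.empty) (x, y)
    = decide ((x - ax).natAbs ≤ 1 ∧ (y - ay).natAbs ≤ 1) := by
  have h : PySem.List.pyRange (-1) 2 1 = [-1, 0, 1] := by decide
  rw [h]
  simp only [List.foldl]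
  rw [Bool.eq_iff_iff, PySem.Set.contains_iff, decide_eq_true_iff]
  simp only [PySem.Set.mem_add, PySem.Set.empty, List.not_mem_nil, false_or, Prod.mk.injEq]
  omega

theorem pv_filterMap_eq (ax ay : Int) (l : List (Int × (Int × Int))) :
    (l.filter (fun p => decide ((p.2.1 - ax).natAbs ≤ 1 ∧ (p.2.2 - ay).natAbs ≤ 1))).map
        (fun p => (p.1, p.2.1, p.2.2))
    = l.filterMap (fun p =>
        if (p.2.1 - ax).natAbs ≤ 1 ∧ (p.2.2 - ay).natAbs ≤ 1 then
          some (p.1, p.2.1, p.2.2)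
        else none) := by
  induction l with
  | nil => rfl
  | cons p l ih =>
    by_cases hc : (p.2.1 - ax).natAbs ≤ 1 ∧ (p.2.2 - ay).natAbs ≤ 1
    · simp only [List.filter_cons, List.filterMap_cons, decide_eq_true hc, if_true,
        if_pos hc, List.map_cons, ih]
    · simp only [List.filter_cons, List.filterMap_cons, decide_eq_false hc,
        Bool.false_eq_true, if_false, if_neg hc, ih]

theorem check_collision_radius_1_eq (path : List (Int × Int)) (ax ay : Int) :
    check_collision_radius_1 path ax ay = check_collision_radius_1_alt path ax ay := by
  unfold check_collision_radius_1 check_collision_radius_1_alt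
  dsimp only
  rw [PySem.List.foldl_append_if]
  have hcond : (fun p : Int × (Int × Int) => PySem.Set.contains
      ((PySem.List.pyRange (-1) 2 1).foldl (fun s dx =>
        (PySem.List.pyRange (-1) 2 1).foldl (fun s dy =>
          PySem.Set.add s (ax + dx, ay + dy)) s) PySem.Set.empty) p.2)
      = (fun p : Int × (Int × Int) => decide ((p.2.1 - ax).natAbs ≤ 1 ∧ (p.2.2 - ay).natAbs ≤ 1)) := by
    funext p
    exact pv_mem_forbidden ax ay p.2.1 p.2.2
  rw [hcond, List.nil_append, pv_filterMap_eq]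

-- ===== VERDICT (by name: the statement is the Claim_ definition above) =====
theorem check_collision_radius_1_spec : Claim_equal_check_collision_radius_1 := by
  intro path ax ay _
  exact check_collision_radius_1_eq path ax ay
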